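-- pv_equiv track=rewrite | github.com/AndyGudkoff/tms_qap-18_Gudkov | QAP_18_HW4.py | calculate_digits
-- ===== SOURCE A (Python) =====
-- def calculate_digits(N):
--
--     digit_count = 0
--     digit_sum = 0
--
--     while N > 0:
--         digit = N % 10
--
--         digit_count += 1
--         digit_sum += digit
--
--         N //= 10
--
--     return digit_count, digit_sum
-- ===== SOURCE B (Python) =====
-- def calculate_digits(N):
--     # String-based: convert N to its decimal string, count chars and sum digit values.
--     if N <= 0:
--         return 0, 0
--     s = str(N)
--     return len(s), sum(ord(c) - 48 for c in s)
-- ===== Notes on version B (the rewrite author's own statement) =====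
-- stated objective: idiomatic
-- what changed: Replaces the arithmetic while-loop (repeated %10 and //=10) by converting N to its decimal string and taking its length and the sum of its digit characters.
import Mathlib
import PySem

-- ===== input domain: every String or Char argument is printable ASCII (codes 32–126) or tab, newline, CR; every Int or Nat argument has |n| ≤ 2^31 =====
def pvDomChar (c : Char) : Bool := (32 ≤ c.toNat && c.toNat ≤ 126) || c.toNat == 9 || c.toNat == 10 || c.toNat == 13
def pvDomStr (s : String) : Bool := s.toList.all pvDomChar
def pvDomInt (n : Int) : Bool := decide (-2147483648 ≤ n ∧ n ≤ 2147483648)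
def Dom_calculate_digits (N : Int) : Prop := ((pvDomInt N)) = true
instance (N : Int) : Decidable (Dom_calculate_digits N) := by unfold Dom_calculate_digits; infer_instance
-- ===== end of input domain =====

-- B replaces A's arithmetic %10 / //=10 loop by reading the digits off str(N); same values, no speed claim.

-- ===== PORT A =====
-- literal port of A's while-loop: state (N, digit_count, digit_sum), loop while N > 0
def calcDigitsGo (N digit_count digit_sum : Int) : Int × Int :=
  if _h : 0 < N then
    calcDigitsGo (PySem.Int.floordiv N 10) (digit_count + 1) (digit_sum + PySem.Int.mod N 10)
  else
    (digit_count, digit_sum)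
termination_by N.toNat
decreasing_by
  simp only [PySem.Int.floordiv]
  rw [Int.fdiv_eq_ediv_of_nonneg N (by omega : (0:Int) ≤ 10)]
  omega

def calculate_digits (N : Int) : Int × Int := calcDigitsGo N 0 0

-- ===== PORT B =====
def calculate_digits_alt (N : Int) : Int × Int :=
  if N ≤ 0 then (0, 0)
  else
    let s := PySem.Int.toStr N
    (PySem.Str.len s, ((s.toList.map (fun c => ((c.toNat : Int) - 48))).sum))

-- ===== PRECONDITION & SPEC =====
def Spec_calculate_digits (N : Int) (out : Int × Int) : Prop := out = calculate_digits_alt N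
instance (N : Int) (out : Int × Int) : Decidable (Spec_calculate_digits N out) := by unfold Spec_calculate_digits; infer_instance

-- ===== CLAIM (what is proved, stated in full; the proofs are below) =====
def Claim_equal_calculate_digits : Prop := ∀ (N : Int), Dom_calculate_digits N → Spec_calculate_digits N (calculate_digits N)

-- ===== LEMMAS AND PROOFS =====

-- fuel irrelevance for Nat.toDigitsCore (base 10)
lemma toDigitsCore_fuel (f f' n : Nat) (l : List Char) (hf : n < f) (hf' : n < f') :
    Nat.toDigitsCore 10 f n l = Nat.toDigitsCore 10 f' n l := by
  induction f generalizing f' n l with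
  | zero => omega
  | succ f ih =>
    obtain ⟨f'', rfl⟩ : ∃ k, f' = k + 1 := ⟨f' - 1, by omega⟩
    simp only [Nat.toDigitsCore]
    by_cases h : n / 10 = 0
    · simp [h]
    · simp only [h, if_false]
      exact ih f'' (n / 10) _ (by omega) (by omega)

lemma toDigitsCore_append (f n : Nat) (l : List Char) :
    Nat.toDigitsCore 10 f n l = Nat.toDigitsCore 10 f n [] ++ l := by
  induction f generalizing n l with
  | zero => simp [Nat.toDigitsCore]
  | succ f ih =>
    simp only [Nat.toDigitsCore]
    by_cases h : n / 10 = 0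
    · simp [h]
    · simp only [h, if_false]
      rw [ih (n / 10) (Nat.digitChar (n % 10) :: l),
          ih (n / 10) [Nat.digitChar (n % 10)]]
      simp

lemma toDigits_small (n : Nat) (h : n < 10) :
    Nat.toDigits 10 n = [Nat.digitChar n] := by
  simp [Nat.toDigits, Nat.toDigitsCore, Nat.div_eq_of_lt h, Nat.mod_eq_of_lt h]

lemma core_succ (f n : Nat) (l : List Char) :
    Nat.toDigitsCore 10 (f + 1) n l =
      if n / 10 = 0 then Nat.digitChar (n % 10) :: l
      else Nat.toDigitsCore 10 f (n / 10) (Nat.digitChar (n % 10) :: l) := by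
  rfl

lemma toDigits_step (n : Nat) (h : 10 ≤ n) :
    Nat.toDigits 10 n = Nat.toDigits 10 (n / 10) ++ [Nat.digitChar (n % 10)] := by
  have h10 : n / 10 ≠ 0 := by omega
  rw [show Nat.toDigits 10 n = Nat.toDigitsCore 10 (n + 1) n [] from rfl, core_succ]
  simp only [h10, if_false]
  rw [toDigitsCore_append, toDigitsCore_fuel n (n / 10 + 1) (n / 10) []
        (by omega) (by omega)]
  rfl

lemma digitChar_val (d : Nat) (h : d < 10) :
    ((Nat.digitChar d).toNat : Int) - 48 = (d : Int) := by
  interval_cases d <;> decide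

-- the loop of A computes length and digit-char sum of Nat.toDigits 10 m
lemma calcDigitsGo_eq (m : Nat) (hm : 0 < m) :
    ∀ c s : Int, calcDigitsGo (m : Int) c s =
      (c + ((Nat.toDigits 10 m).length : Int),
       s + ((Nat.toDigits 10 m).map (fun ch => ((ch.toNat : Int) - 48))).sum) := by
  induction m using Nat.strong_induction_on with
  | _ m ih =>
    intro c s
    rw [calcDigitsGo.eq_def]
    have hpos : (0 : Int) < (m : Int) := by exact_mod_cast hm
    simp only [hpos, dif_pos]
    have hfd : PySem.Int.floordiv (m : Int) 10 = ((m / 10 : Nat) : Int) := by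
      simp only [PySem.Int.floordiv]
      rw [Int.fdiv_eq_ediv_of_nonneg _ (by omega : (0:Int) ≤ 10)]
      omega
    have hmd : PySem.Int.mod (m : Int) 10 = ((m % 10 : Nat) : Int) := by
      simp only [PySem.Int.mod]
      have := Int.fmod_eq_emod (a := (m : Int)) (b := 10)
      simp at this
      omega
    rw [hfd, hmd]
    by_cases hsmall : m < 10
    · have : m / 10 = 0 := Nat.div_eq_of_lt hsmall
      rw [this]
      rw [calcDigitsGo.eq_def]
      simp [toDigits_small m hsmall, digitChar_val m hsmall,
            Nat.mod_eq_of_lt hsmall]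
    · have h10 : 10 ≤ m := by omega
      rw [ih (m / 10) (by omega) (by omega)]
      rw [toDigits_step m h10]
      simp [digitChar_val (m % 10) (Nat.mod_lt m (by omega))]
      constructor <;> ring

-- ===== VERDICT (by name: the statement is the Claim_ definition above) =====
theorem calculate_digits_spec : Claim_equal_calculate_digits := by
  intro N _
  unfold Spec_calculate_digits calculate_digits calculate_digits_alt
  by_cases h : N ≤ 0
  · rw [calcDigitsGo.eq_def]
    simp [h]
  · rw [not_le] at h
    simp only [not_le.mpr h, if_false]
    obtain ⟨m, rfl⟩ : ∃ m : Nat, N = (m : Int) := ⟨N.toNat, by omega⟩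
    have hm : 0 < m := by exact_mod_cast h
    rw [calcDigitsGo_eq m hm 0 0]
    have htc : (PySem.Int.toStr (m : Int)).toList = Nat.toDigits 10 m := by
      rw [PySem.Int.toList_toStr]
      simp [PySem.Int.toChars]
    simp [PySem.Str.len, htc]
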